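-- pv_equiv track=rewrite | github.com/kapjain/Learn-Python | Project-Python/practive_reverse_str.py | remove_consequative
-- ===== SOURCE A (Python) =====
-- def remove_consequative(string):
--     idx = 0
--     str_len = len(string)
--     new_str = ''
--     while(idx<str_len):
--         if idx == str_len-1:
--             new_str = new_str + string[idx]
--             return new_str
--         if ord(string[idx])+1 == ord(string[idx+1]):
--             while(idx<str_len-1 and ord(string[idx])+1 == ord(string[idx+1])):
--                 idx += 1
--
--         else:
--             new_str = new_str + string[idx]
--         idx = idx + 1
--     return new_str
-- ===== SOURCE B (Python) =====
-- def remove_consequative(string):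
--     n = len(string)
--     link = [ord(string[i]) + 1 == ord(string[i + 1]) for i in range(n - 1)]
--     return ''.join(string[i] for i in range(n)
--                    if not (i > 0 and link[i - 1]) and not (i < n - 1 and link[i]))
-- ===== Notes on version B (the rewrite author's own statement) =====
-- stated objective: simpler
-- what changed: Replaced A's while-loop state machine (inner while advancing a shared index over ascending runs, building the result by repeated string concatenation) by precomputing the adjacency relation link[i] = (ord(s[i])+1 == ord(s[i+1])) and one declarative filter pass joined into the result, keeping s[i] iff it has no link on either side.
import Mathlib
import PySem

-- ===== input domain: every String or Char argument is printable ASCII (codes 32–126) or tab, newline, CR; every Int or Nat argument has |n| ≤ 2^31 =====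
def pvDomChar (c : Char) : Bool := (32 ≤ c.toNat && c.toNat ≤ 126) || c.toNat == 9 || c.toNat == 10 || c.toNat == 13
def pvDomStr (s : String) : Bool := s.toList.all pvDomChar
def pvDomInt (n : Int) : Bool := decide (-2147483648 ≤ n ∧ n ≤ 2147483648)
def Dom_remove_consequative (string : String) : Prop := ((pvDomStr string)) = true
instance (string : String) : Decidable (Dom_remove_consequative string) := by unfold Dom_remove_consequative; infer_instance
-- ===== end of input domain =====

-- B replaces A's run-skipping while-loop state machine by a precomputed adjacency
-- relation plus one filter pass; same O(n) cost, plainer shape.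

-- ===== PORT A =====
-- ord(string[idx]) on an in-range index (all calls below are in range).
def ordAt (cs : List Char) (i : Nat) : Nat := (cs.getD i ' ').toNat

-- the inner `while(idx<str_len-1 and ord(string[idx])+1 == ord(string[idx+1])): idx += 1`
def innerA (cs : List Char) (idx : Nat) : Nat :=
  if idx < cs.length - 1 ∧ ordAt cs idx + 1 = ordAt cs (idx + 1) then innerA cs (idx + 1)
  else idx
termination_by cs.length - 1 - idx
decreasing_by omega

theorem innerA_ge (cs : List Char) (idx : Nat) : idx ≤ innerA cs idx := by
  fun_induction innerA cs idx with
  | case1 idx h ih => omega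
  | case2 idx h => omega

-- the outer while loop of A, carrying idx and new_str (acc)
def goA (cs : List Char) (idx : Nat) (acc : List Char) : List Char :=
  if idx < cs.length then
    if idx = cs.length - 1 then acc ++ [cs.getD idx ' ']
    else if ordAt cs idx + 1 = ordAt cs (idx + 1) then
      goA cs (innerA cs idx + 1) acc
    else
      goA cs (idx + 1) (acc ++ [cs.getD idx ' '])
  else acc
termination_by cs.length - idx
decreasing_by
  · have := innerA_ge cs idx; omega
  · omega

def remove_consequative (string : String) : String :=
  String.ofList (goA string.toList 0 [])

-- ===== PORT B =====
-- link = [ord(string[i]) + 1 == ord(string[i + 1]) for i in range(n - 1)]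
-- ''.join(string[i] for i in range(n) if not (i > 0 and link[i-1]) and not (i < n-1 and link[i]))
def remove_consequative_alt (string : String) : String :=
  let cs := string.toList
  let n := cs.length
  let link := (List.range (n - 1)).map
    (fun i => (cs.getD i ' ').toNat + 1 == (cs.getD (i + 1) ' ').toNat)
  String.ofList ((List.range n).filterMap (fun i =>
    if ¬(0 < i ∧ link.getD (i - 1) false = true) ∧ ¬(i < n - 1 ∧ link.getD i false = true)
    then some (cs.getD i ' ') else none))

-- ===== PRECONDITION & SPEC =====
def Spec_remove_consequative (string : String) (out : String) : Prop := out = remove_consequative_alt string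
instance (string : String) (out : String) : Decidable (Spec_remove_consequative string out) := by unfold Spec_remove_consequative; infer_instance

-- ===== CLAIM (what is proved, stated in full; the proofs are below) =====
def Claim_equal_remove_consequative : Prop := ∀ (string : String), Dom_remove_consequative string → Spec_remove_consequative string (remove_consequative string)

-- ===== LEMMAS AND PROOFS =====

-- keep condition of B, phrased over cs directly
abbrev keepB (cs : List Char) (i : Nat) : Prop :=
  ¬(0 < i ∧ ordAt cs (i - 1) + 1 = ordAt cs i) ∧ ¬(i + 1 < cs.length ∧ ordAt cs i + 1 = ordAt cs (i + 1))


def keepFrom (cs : List Char) (idx : Nat) : List Char :=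
  (List.range' idx (cs.length - idx)).filterMap
    (fun i => if keepB cs i then some (cs.getD i ' ') else none)

theorem keepFrom_succ (cs : List Char) (idx : Nat) :
    keepFrom cs idx =
      (if idx < cs.length ∧ keepB cs idx then [cs.getD idx ' '] else []) ++ keepFrom cs (idx + 1) := by
  unfold keepFrom
  by_cases h : idx < cs.length
  · have hn : cs.length - idx = (cs.length - (idx + 1)) + 1 := by omega
    rw [hn, List.range'_succ, List.filterMap_cons]
    by_cases hk : keepB cs idx
    · rw [if_pos hk, if_pos ⟨h, hk⟩]
      simp
    · rw [if_neg hk, if_neg (fun hc => hk hc.2)]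
      simp
  · have h0 : cs.length - idx = 0 := by omega
    have h1 : cs.length - (idx + 1) = 0 := by omega
    simp [h0, h1, h]

theorem keepFrom_drop (cs : List Char) (m idx : Nat)
    (h : ∀ j, idx ≤ j → j < idx + m → ¬ keepB cs j) :
    keepFrom cs idx = keepFrom cs (idx + m) := by
  induction m generalizing idx with
  | zero => rfl
  | succ m ih =>
    rw [keepFrom_succ]
    have hk : ¬ keepB cs idx := h idx le_rfl (by omega)
    have : keepFrom cs (idx + 1) = keepFrom cs (idx + 1 + m) :=
      ih (idx + 1) (fun j h1 h2 => h j (by omega) (by omega))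
    simp [hk, this]
    congr 1
    omega

theorem innerA_stop (cs : List Char) (idx : Nat) :
    ¬(innerA cs idx < cs.length - 1 ∧ ordAt cs (innerA cs idx) + 1 = ordAt cs (innerA cs idx + 1)) := by
  fun_induction innerA cs idx with
  | case1 idx h ih => exact ih
  | case2 idx h => exact h

theorem innerA_path (cs : List Char) (idx : Nat) :
    ∀ j, idx ≤ j → j < innerA cs idx → ordAt cs j + 1 = ordAt cs (j + 1) := by
  fun_induction innerA cs idx with
  | case1 idx h ih =>
    intro j h1 h2
    rcases Nat.eq_or_lt_of_le h1 with rfl | hlt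
    · exact h.2
    · exact ih j hlt h2
  | case2 idx h => intro j h1 h2; omega

-- main invariant for A's outer loop
theorem goA_eq (cs : List Char) (idx : Nat) (acc : List Char)
    (hinv : idx = 0 ∨ cs.length ≤ idx ∨ ¬ (ordAt cs (idx - 1) + 1 = ordAt cs idx)) :
    goA cs idx acc = acc ++ keepFrom cs idx := by
  fun_induction goA cs idx acc with
  | case1 acc hlt =>
    -- idx = cs.length - 1: last character is appended and kept
    have hk : keepB cs (cs.length - 1) := by
      constructor
      · rintro ⟨h0, hlink⟩
        rcases hinv with h | h | h
        · omega
        · omega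
        · exact h hlink
      · rintro ⟨h1, _⟩; omega
    rw [keepFrom_succ cs (cs.length - 1), if_pos ⟨hlt, hk⟩]
    have h2 : keepFrom cs (cs.length - 1 + 1) = [] := by
      unfold keepFrom
      have h3 : cs.length - (cs.length - 1 + 1) = 0 := by omega
      simp [h3]
    rw [h2]
    simp
  | case2 idx acc hlt hlast hlink ih =>
    -- ascending run: whole run idx..e is dropped
    set e := innerA cs idx with he
    have hge : idx ≤ e := innerA_ge cs idx
    have hstop := innerA_stop cs idx
    have hpath := innerA_path cs idx
    rw [ih (by
      rcases Nat.lt_or_ge e (cs.length - 1) with h | h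
      · right; right
        intro hc
        exact hstop ⟨h, by simpa using hc⟩
      · right; left; omega)]
    congr 1
    have hdrop : ∀ j, idx ≤ j → j < idx + (e + 1 - idx) → ¬ keepB cs j := by
      intro j h1 h2 hk
      rcases Nat.eq_or_lt_of_le h1 with rfl | hlt2
      · exact hk.2 ⟨by omega, hlink⟩
      · refine hk.1 ⟨by omega, ?_⟩
        have hp := hpath (j - 1) (by omega) (by omega)
        have hj : j - 1 + 1 = j := by omega
        rwa [hj] at hp
    have hd := keepFrom_drop cs (e + 1 - idx) idx hdrop
    have h2 : idx + (e + 1 - idx) = e + 1 := by omega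
    rw [hd, h2]
  | case3 idx acc hlt hlast hlink ih =>
    -- kept character
    have hk : keepB cs idx := by
      constructor
      · rintro ⟨h0, hl⟩
        rcases hinv with h | h | h
        · omega
        · omega
        · exact h hl
      · rintro ⟨_, hl⟩; exact hlink hl
    rw [ih (by right; right; simpa using hlink)]
    rw [keepFrom_succ cs idx, if_pos ⟨hlt, hk⟩]
    simp
  | case4 idx acc hlt =>
    unfold keepFrom
    have h0 : cs.length - idx = 0 := by omega
    simp [h0]

-- B's port rewritten through keepFrom
theorem alt_eq (s : String) :
    remove_consequative_alt s = String.ofList (keepFrom s.toList 0) := by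
  unfold keepFrom
  simp only [remove_consequative_alt]
  congr 1
  have hlen : s.toList.length - 0 = s.toList.length := by omega
  rw [hlen, ← List.range_eq_range']
  apply List.filterMap_congr
  intro i hi
  have hin : i < s.toList.length := by
    simpa using List.mem_range.mp hi
  have hgetD : ∀ j, j < s.toList.length - 1 →
      ((List.range (s.toList.length - 1)).map
        (fun i => (s.toList.getD i ' ').toNat + 1 == (s.toList.getD (i + 1) ' ').toNat)).getD j false
      = decide ((s.toList.getD j ' ').toNat + 1 = (s.toList.getD (j + 1) ' ').toNat) := by
    intro j hj
    have hj' : j < s.length - 1 := by simpa using hj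
    simp [List.getD, hj']
    exact Bool.beq_eq_decide_eq _ _
  have hcond :
      (¬(0 < i ∧ ((List.range (s.toList.length - 1)).map
          (fun i => (s.toList.getD i ' ').toNat + 1 == (s.toList.getD (i + 1) ' ').toNat)).getD (i - 1) false = true)
        ∧ ¬(i < s.toList.length - 1 ∧ ((List.range (s.toList.length - 1)).map
          (fun i => (s.toList.getD i ' ').toNat + 1 == (s.toList.getD (i + 1) ' ').toNat)).getD i false = true))
      ↔ keepB s.toList i := by
    unfold keepB ordAt
    constructor
    · rintro ⟨h1, h2⟩
      constructor
      · rintro ⟨h0, hl⟩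
        apply h1
        refine ⟨h0, ?_⟩
        rw [hgetD (i - 1) (by omega)]
        have : i - 1 + 1 = i := by omega
        rw [this]
        exact decide_eq_true hl
      · rintro ⟨hb, hl⟩
        apply h2
        refine ⟨by omega, ?_⟩
        rw [hgetD i (by omega)]
        exact decide_eq_true hl
    · rintro ⟨h1, h2⟩
      constructor
      · rintro ⟨h0, hl⟩
        rw [hgetD (i - 1) (by omega)] at hl
        apply h1
        refine ⟨h0, ?_⟩
        have : i - 1 + 1 = i := by omega
        rw [this] at hl
        exact of_decide_eq_true hl
      · rintro ⟨hb, hl⟩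
        rw [hgetD i hb] at hl
        exact h2 ⟨by omega, of_decide_eq_true hl⟩
  by_cases hk : keepB s.toList i
  · rw [if_pos (hcond.mpr hk), if_pos hk]
  · rw [if_neg (fun h => hk (hcond.mp h)), if_neg hk]

-- ===== VERDICT (by name: the statement is the Claim_ definition above) =====
theorem remove_consequative_spec : Claim_equal_remove_consequative := by
  intro s _
  unfold Spec_remove_consequative remove_consequative
  rw [alt_eq, goA_eq s.toList 0 [] (Or.inl rfl)]
  rfl
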